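-- pv_equiv track=rewrite | github.com/Shiva-netizen/Core_Leetcode | Boolean Matrix - GFG/boolean-matrix.py | booleanMatrix
-- ===== SOURCE A (Python) =====
-- def booleanMatrix(matrix):
--     # code here
--     r=len(matrix)
--     c=len(matrix[0])
--     row=[]
--     col=[]
--     for i in range(r):
--         for j in range(c):
--             if matrix[i][j]==1:
--                 row.append(i)
--                 col.append(j)
--     row=set(row)
--     col=set(col)
--     for i in row:
--         for k in range(c):
--             matrix[i][k]=1
--     for j in col:
--         for t in range(r):
--             matrix[t][j]=1
--     return matrix
-- ===== SOURCE B (Python) =====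
-- def booleanMatrix(matrix):
--     # In-place marker technique: the first row and first column double as the
--     # flag store for the rest of the matrix, so only two scalar flags of extra
--     # memory are needed.
--     if not matrix or not matrix[0]:
--         return matrix
--     r, c = len(matrix), len(matrix[0])
--     first_row = any(matrix[0][j] == 1 for j in range(c))
--     first_col = any(matrix[i][0] == 1 for i in range(r))
--     for i in range(1, r):
--         for j in range(1, c):
--             if matrix[i][j] == 1:
--                 matrix[i][0] = 1
--                 matrix[0][j] = 1
--     for i in range(1, r):
--         for j in range(1, c):
--             if matrix[i][0] == 1 or matrix[0][j] == 1:
--                 matrix[i][j] = 1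
--     if first_row:
--         for j in range(c):
--             matrix[0][j] = 1
--     if first_col:
--         for i in range(r):
--             matrix[i][0] = 1
--     return matrix
-- ===== Notes on version B (the rewrite author's own statement) =====
-- stated objective: alternative
-- what changed: B uses the classic in-place marker technique (the first row and first column double as the flag store, plus two scalar flags, constant extra memory) instead of A's collecting hit indices into row/column sets and then block-rewriting whole rows and whole columns.
import Mathlib
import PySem

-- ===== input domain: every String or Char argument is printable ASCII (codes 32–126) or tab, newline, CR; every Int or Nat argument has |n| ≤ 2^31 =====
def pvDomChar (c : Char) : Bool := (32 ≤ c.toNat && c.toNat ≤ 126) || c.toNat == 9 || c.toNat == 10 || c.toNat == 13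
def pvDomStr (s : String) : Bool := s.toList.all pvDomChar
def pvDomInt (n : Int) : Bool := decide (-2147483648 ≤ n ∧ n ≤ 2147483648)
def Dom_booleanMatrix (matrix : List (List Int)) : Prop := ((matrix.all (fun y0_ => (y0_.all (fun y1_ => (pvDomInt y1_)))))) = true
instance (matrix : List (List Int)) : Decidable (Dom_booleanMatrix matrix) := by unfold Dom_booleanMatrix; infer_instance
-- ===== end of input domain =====

-- B replaces A's "collect hit indices into sets, then block-rewrite whole rows and
-- whole columns" by the classic in-place marker technique: the first row and first
-- column double as the flag store (plus two scalar flags), constant extra memory.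
-- Both Pythons mutate the argument in place; the equivalence proved here is about
-- the RETURN value (the final contents coincide as well).


-- ===== PORT A =====
-- matrix[i][j] read / write with nonnegative indices (in range on Pre_ inputs):
def pvGetCell (m : List (List Int)) (i j : Nat) : Int := (m.getD i []).getD j 0
def pvSetCell (m : List (List Int)) (i j : Nat) (v : Int) : List (List Int) :=
  m.set i ((m.getD i []).set j v)

def booleanMatrix (matrix : List (List Int)) : List (List Int) :=
  let r := matrix.length
  let c := (matrix.headD []).length
  let rc : List Nat × List Nat :=
    (List.range r).foldl (fun acc i =>
      (List.range c).foldl (fun acc j =>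
        if pvGetCell matrix i j = 1 then (acc.1 ++ [i], acc.2 ++ [j]) else acc) acc)
      ([], [])
  let rowS : PySem.Set Nat := PySem.Set.ofList rc.1
  let colS : PySem.Set Nat := PySem.Set.ofList rc.2
  let m1 := rowS.foldl (fun m i => (List.range c).foldl (fun m k => pvSetCell m i k 1) m) matrix
  colS.foldl (fun m j => (List.range r).foldl (fun m t => pvSetCell m t j 1) m) m1

-- ===== PORT B =====
def booleanMatrix_alt (matrix : List (List Int)) : List (List Int) :=
  if matrix.isEmpty || (matrix.headD []).isEmpty then matrix else
  let r := matrix.length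
  let c := (matrix.headD []).length
  let firstRow := (List.range c).any (fun j => pvGetCell matrix 0 j == 1)
  let firstCol := (List.range r).any (fun i => pvGetCell matrix i 0 == 1)
  let m1 := (List.range' 1 (r - 1)).foldl (fun m i =>
      (List.range' 1 (c - 1)).foldl (fun m j =>
        if pvGetCell m i j = 1 then pvSetCell (pvSetCell m i 0 1) 0 j 1 else m) m) matrix
  let m2 := (List.range' 1 (r - 1)).foldl (fun m i =>
      (List.range' 1 (c - 1)).foldl (fun m j =>
        if pvGetCell m i 0 = 1 ∨ pvGetCell m 0 j = 1 then pvSetCell m i j 1 else m) m) m1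
  let m3 := if firstRow then (List.range c).foldl (fun m j => pvSetCell m 0 j 1) m2 else m2
  if firstCol then (List.range r).foldl (fun m i => pvSetCell m i 0 1) m3 else m3

-- ===== PRECONDITION & SPEC =====
-- Pre_ excludes exactly the inputs on which the Python A raises IndexError: the empty
-- matrix (matrix[0]) and matrices with some row shorter than the first row
-- (matrix[i][j] with j < len(matrix[0]) raises in the first pass).
def Pre_booleanMatrix (matrix : List (List Int)) : Prop :=
  matrix ≠ [] ∧ ∀ row ∈ matrix, (matrix.headD []).length ≤ row.length
instance (matrix : List (List Int)) : Decidable (Pre_booleanMatrix matrix) := by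
  unfold Pre_booleanMatrix; infer_instance

def pvWitness_booleanMatrix : List (List Int) := [[0, 1], [0, 0]]

def Spec_booleanMatrix (matrix : List (List Int)) (out : List (List Int)) : Prop := out = booleanMatrix_alt matrix
instance (matrix : List (List Int)) (out : List (List Int)) : Decidable (Spec_booleanMatrix matrix out) := by unfold Spec_booleanMatrix; infer_instance

-- ===== CLAIM (what is proved, stated in full; the proofs are below) =====
def Claim_equal_booleanMatrix : Prop := ∀ (matrix : List (List Int)), Dom_booleanMatrix matrix → Pre_booleanMatrix matrix → Spec_booleanMatrix matrix (booleanMatrix matrix)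

-- ===== LEMMAS AND PROOFS =====

theorem getCell_pvSetCell (m : List (List Int)) (a b : Nat) (v : Int) (x y : Nat) :
    pvGetCell (pvSetCell m a b v) x y =
      if x = a ∧ y = b ∧ a < m.length ∧ b < (m.getD a []).length then v
      else pvGetCell m x y := by
  unfold pvGetCell pvSetCell
  simp only [List.getD_eq_getElem?_getD]
  by_cases hx : x = a
  · subst hx
    by_cases ha : x < m.length
    · simp only [List.getElem?_eq_getElem ha, Option.getD_some] at *
      rw [List.getElem?_set_eq_of_lt _ ha]
      simp only [Option.getD_some]
      by_cases hy : y = b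
      · subst hy
        by_cases hb : y < m[x].length
        · rw [List.getElem?_set_eq_of_lt _ hb]
          simp [ha, hb]
        · rw [List.getElem?_set_self', List.getElem?_eq_none (by omega)]
          simp [ha, hb]
      · rw [List.getElem?_set_ne (by omega)]
        simp [hy]
    · rw [List.set_eq_of_length_le (by omega)]
      simp [ha]
  · rw [List.getElem?_set_ne (by omega)]
    simp [hx]

def pvWriteAll (P : List (Nat × Nat)) (m : List (List Int)) : List (List Int) :=
  P.foldl (fun m p => pvSetCell m p.1 p.2 1) m

theorem length_pvSetCell (m : List (List Int)) (a b : Nat) (v : Int) :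
    (pvSetCell m a b v).length = m.length := by simp [pvSetCell]

theorem rowlen_pvSetCell (m : List (List Int)) (a b : Nat) (v : Int) (i : Nat) :
    ((pvSetCell m a b v).getD i []).length = (m.getD i []).length := by
  unfold pvSetCell
  simp only [List.getD_eq_getElem?_getD]
  by_cases h : i = a
  · subst h
    by_cases ha : i < m.length
    · rw [List.getElem?_set_eq_of_lt _ ha]
      simp
    · rw [List.set_eq_of_length_le (by omega)]
  · rw [List.getElem?_set_ne (by omega)]

theorem length_pvWriteAll (P : List (Nat × Nat)) (m : List (List Int)) :
    (pvWriteAll P m).length = m.length := by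
  induction P generalizing m with
  | nil => rfl
  | cons p P ih =>
    rw [show pvWriteAll (p :: P) m = pvWriteAll P (pvSetCell m p.1 p.2 1) from rfl,
      ih, length_pvSetCell]

theorem rowlen_pvWriteAll (P : List (Nat × Nat)) (m : List (List Int)) (i : Nat) :
    ((pvWriteAll P m).getD i []).length = (m.getD i []).length := by
  induction P generalizing m with
  | nil => rfl
  | cons p P ih =>
    rw [show pvWriteAll (p :: P) m = pvWriteAll P (pvSetCell m p.1 p.2 1) from rfl,
      ih, rowlen_pvSetCell]

theorem getCell_pvWriteAll (P : List (Nat × Nat)) (m : List (List Int)) (x y : Nat) :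
    pvGetCell (pvWriteAll P m) x y =
      if (x, y) ∈ P ∧ x < m.length ∧ y < (m.getD x []).length then 1
      else pvGetCell m x y := by
  induction P generalizing m with
  | nil => simp [pvWriteAll]
  | cons p P ih =>
    rw [show pvWriteAll (p :: P) m = pvWriteAll P (pvSetCell m p.1 p.2 1) from rfl,
      ih, length_pvSetCell, rowlen_pvSetCell, getCell_pvSetCell]
    by_cases hm : (x, y) ∈ P ∧ x < m.length ∧ y < (m.getD x []).length
    · rw [if_pos hm, if_pos ⟨List.mem_cons_of_mem _ hm.1, hm.2⟩]
    · rw [if_neg hm]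
      by_cases hp : x = p.1 ∧ y = p.2 ∧ p.1 < m.length ∧ p.2 < (m.getD p.1 []).length
      · obtain ⟨h1, h2, h3, h4⟩ := hp
        subst h1; subst h2
        rw [if_pos ⟨rfl, rfl, h3, h4⟩, if_pos ⟨by simp, h3, h4⟩]
      · rw [if_neg hp, if_neg]
        rintro ⟨hmem, hx, hy⟩
        rcases List.mem_cons.mp hmem with he | ht
        · exact hp ⟨congrArg Prod.fst he, congrArg Prod.snd he, by
            rw [← congrArg Prod.fst he]; exact hx, by
            rw [← congrArg Prod.fst he, ← congrArg Prod.snd he]; exact hy⟩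
        · exact hm ⟨ht, hx, hy⟩

theorem rowLoop_eq_writeAll (S : List Nat) (c : Nat) (m : List (List Int)) :
    S.foldl (fun m i => (List.range c).foldl (fun m k => pvSetCell m i k 1) m) m =
      pvWriteAll (S.flatMap (fun i => (List.range c).map (fun k => (i, k)))) m := by
  induction S generalizing m with
  | nil => rfl
  | cons i S ih =>
    rw [List.foldl_cons, ih]
    unfold pvWriteAll
    rw [List.flatMap_cons, List.foldl_append, List.foldl_map]

theorem colLoop_eq_writeAll (S : List Nat) (r : Nat) (m : List (List Int)) :
    S.foldl (fun m j => (List.range r).foldl (fun m t => pvSetCell m t j 1) m) m =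
      pvWriteAll (S.flatMap (fun j => (List.range r).map (fun t => (t, j)))) m := by
  induction S generalizing m with
  | nil => rfl
  | cons j S ih =>
    rw [List.foldl_cons, ih]
    unfold pvWriteAll
    rw [List.flatMap_cons, List.foldl_append, List.foldl_map]

theorem collect_inner (q : Nat → Nat → Prop) [∀ i j, Decidable (q i j)]
    (i : Nat) (L : List Nat) (a : List Nat × List Nat) :
    L.foldl (fun acc j => if q i j then (acc.1 ++ [i], acc.2 ++ [j]) else acc) a =
      (a.1 ++ (L.filter (fun j => decide (q i j))).map (fun _ => i),
       a.2 ++ L.filter (fun j => decide (q i j))) := by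
  induction L generalizing a with
  | nil => simp
  | cons j L ih =>
    rw [List.foldl_cons]
    by_cases h : q i j
    · rw [if_pos h, ih]
      simp [h]
    · rw [if_neg h, ih]
      simp [h]

theorem collect_outer (q : Nat → Nat → Prop) [∀ i j, Decidable (q i j)]
    (L : List Nat) (c : Nat) (a : List Nat × List Nat) :
    L.foldl (fun acc i =>
        (List.range c).foldl (fun acc j =>
          if q i j then (acc.1 ++ [i], acc.2 ++ [j]) else acc) acc) a =
      (a.1 ++ L.flatMap (fun i => (((List.range c).filter (fun j => decide (q i j))).map (fun _ => i))),
       a.2 ++ L.flatMap (fun i => (List.range c).filter (fun j => decide (q i j)))) := by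
  induction L generalizing a with
  | nil => simp
  | cons i L ih =>
    rw [List.foldl_cons, collect_inner, ih]
    simp [List.flatMap_cons]

theorem eq_of_cells (Wa Wb : List (List Int)) (hlen : Wa.length = Wb.length)
    (hrl : ∀ x, ((Wa.getD x []).length = (Wb.getD x []).length))
    (hcell : ∀ x y, x < Wa.length → y < (Wa.getD x []).length →
      pvGetCell Wa x y = pvGetCell Wb x y) : Wa = Wb := by
  refine List.ext_getElem hlen ?_
  intro x h1 h2
  refine List.ext_getElem ?_ ?_
  · have := hrl x
    rwa [List.getD_eq_getElem _ _ h1, List.getD_eq_getElem _ _ h2] at this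
  · intro y hy1 hy2
    have := hcell x y h1 (by rwa [List.getD_eq_getElem _ _ h1])
    unfold pvGetCell at this
    rwa [List.getD_eq_getElem _ _ h1, List.getD_eq_getElem _ _ h2,
      List.getD_eq_getElem _ _ hy1, List.getD_eq_getElem _ _ hy2] at this

theorem if_merge2 (p q : Prop) [Decidable p] [Decidable q] (g : Int) :
    (if p then (1 : Int) else if q then 1 else g) = if p ∨ q then 1 else g := by
  split_ifs <;> tauto

theorem if_merge4 (p q s t : Prop) [Decidable p] [Decidable q] [Decidable s] [Decidable t]
    (g : Int) :
    (if p then (1 : Int) else if q then 1 else if s then 1 else if t then 1 else g) =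
      if p ∨ q ∨ s ∨ t then 1 else g := by
  split_ifs <;> tauto

theorem foldl_id {α β : Type} (l : List β) (a : α) : l.foldl (fun a _ => a) a = a := by
  induction l generalizing a with
  | nil => rfl
  | cons b l ih => rw [List.foldl_cons]; exact ih a

-- A's result, cell by cell
theorem cellA (m : List (List Int)) (x y : Nat) (hx : x < m.length)
    (hy : y < (m.getD x []).length) :
    pvGetCell (booleanMatrix m) x y =
      if y < (m.headD []).length ∧
          ((∃ j, j < (m.headD []).length ∧ pvGetCell m x j = 1) ∨
           (∃ i, i < m.length ∧ pvGetCell m i y = 1)) then 1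
      else pvGetCell m x y := by
  simp only [booleanMatrix]
  rw [collect_outer (fun i j => pvGetCell m i j = 1)]
  rw [rowLoop_eq_writeAll, colLoop_eq_writeAll]
  simp only [List.nil_append]
  rw [getCell_pvWriteAll, length_pvWriteAll, rowlen_pvWriteAll, getCell_pvWriteAll,
    if_merge2]
  refine if_congr ?_ rfl rfl
  simp only [List.mem_flatMap, PySem.Set.mem_ofList, List.mem_filter, List.mem_map,
    List.mem_range, decide_eq_true_eq, Prod.mk.injEq, hx, hy, and_true]
  constructor
  · rintro (⟨j, ⟨i, hi, hjc, hq⟩, t, ht, htx, hjy⟩ | ⟨i, ⟨i2, hi2, hmm⟩, k, hk, hix, hky⟩)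
    · subst htx; subst hjy
      exact ⟨hjc, Or.inr ⟨i, hi, hq⟩⟩
    · subst hix; subst hky
      obtain ⟨a, ⟨hac, hq⟩, rfl⟩ := hmm
      exact ⟨hk, Or.inl ⟨a, hac, hq⟩⟩
  · rintro ⟨hyc, ⟨j, hjc, hq⟩ | ⟨i, hi', hq⟩⟩
    · exact Or.inr ⟨x, ⟨x, hx, ⟨j, ⟨hjc, hq⟩, rfl⟩⟩, ⟨y, hyc, rfl, rfl⟩⟩
    · exact Or.inl ⟨y, ⟨i, hi', hyc, hq⟩, ⟨x, hx, rfl, rfl⟩⟩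

-- ----- B-side machinery -----

theorem interiorPres (P : List (Nat × Nat)) (m : List (List Int))
    (hP : ∀ p ∈ P, p.1 = 0 ∨ p.2 = 0) (x y : Nat) (hx : 1 ≤ x) (hy : 1 ≤ y) :
    pvGetCell (pvWriteAll P m) x y = pvGetCell m x y := by
  rw [getCell_pvWriteAll, if_neg]
  rintro ⟨hmem, -⟩
  rcases hP _ hmem with h | h <;> simp at h <;> omega

theorem borderPres (P : List (Nat × Nat)) (m : List (List Int))
    (hP : ∀ p ∈ P, 1 ≤ p.1 ∧ 1 ≤ p.2) (x y : Nat) (h0 : x = 0 ∨ y = 0) :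
    pvGetCell (pvWriteAll P m) x y = pvGetCell m x y := by
  rw [getCell_pvWriteAll, if_neg]
  rintro ⟨hmem, -⟩
  have := hP _ hmem
  simp at this
  omega

theorem mem_ite_list {α : Type} (p : Prop) [Decidable p] (a : α) (l : List α) :
    a ∈ (if p then l else ([] : List α)) ↔ p ∧ a ∈ l := by
  split_ifs with h <;> simp [h]

-- the marking pass as one write list
def pvL1 (m : List (List Int)) : List (Nat × Nat) :=
  (List.range' 1 (m.length - 1)).flatMap fun i =>
    (List.range' 1 ((m.headD []).length - 1)).flatMap fun j =>
      if pvGetCell m i j = 1 then [(i, 0), (0, j)] else []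

-- the interior fill pass as one write list (conditions read the marked matrix's border)
def pvL2 (m : List (List Int)) : List (Nat × Nat) :=
  (List.range' 1 (m.length - 1)).flatMap fun i =>
    (List.range' 1 ((m.headD []).length - 1)).flatMap fun j =>
      if pvGetCell (pvWriteAll (pvL1 m) m) i 0 = 1 ∨
         pvGetCell (pvWriteAll (pvL1 m) m) 0 j = 1 then [(i, j)] else []

def pvL3 (m : List (List Int)) : List (Nat × Nat) :=
  if (List.range (m.headD []).length).any (fun j => pvGetCell m 0 j == 1)
  then (List.range (m.headD []).length).map (fun j => ((0 : Nat), j)) else []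

def pvL4 (m : List (List Int)) : List (Nat × Nat) :=
  if (List.range m.length).any (fun i => pvGetCell m i 0 == 1)
  then (List.range m.length).map (fun i => (i, (0 : Nat))) else []

theorem mark_inner (m0 : List (List Int)) (i : Nat) (J : List Nat)
    (hJ : ∀ j ∈ J, 1 ≤ j) (m : List (List Int))
    (hagree : ∀ x y, 1 ≤ x → 1 ≤ y → pvGetCell m x y = pvGetCell m0 x y) (hi : 1 ≤ i) :
    J.foldl (fun m j =>
        if pvGetCell m i j = 1 then pvSetCell (pvSetCell m i 0 1) 0 j 1 else m) m =
      pvWriteAll (J.flatMap fun j =>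
        if pvGetCell m0 i j = 1 then [(i, 0), (0, j)] else []) m := by
  induction J generalizing m with
  | nil => rfl
  | cons j J ih =>
    have hj : 1 ≤ j := hJ j (List.mem_cons_self ..)
    have hJ' : ∀ j ∈ J, 1 ≤ j := fun a ha => hJ a (List.mem_cons_of_mem _ ha)
    rw [List.foldl_cons, List.flatMap_cons]
    rw [hagree i j hi hj]
    by_cases hq : pvGetCell m0 i j = 1
    · rw [if_pos hq, if_pos hq]
      have hagree' : ∀ x y, 1 ≤ x → 1 ≤ y →
          pvGetCell (pvSetCell (pvSetCell m i 0 1) 0 j 1) x y = pvGetCell m0 x y := by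
        intro x y hx hy
        rw [getCell_pvSetCell, if_neg (by omega), getCell_pvSetCell, if_neg (by omega)]
        exact hagree x y hx hy
      rw [ih hJ' _ hagree']
      rfl
    · rw [if_neg hq, if_neg hq, List.nil_append, ih hJ' _ hagree]

theorem mark_outer (m0 : List (List Int)) (I : List Nat) (hI : ∀ i ∈ I, 1 ≤ i)
    (J : List Nat) (hJ : ∀ j ∈ J, 1 ≤ j) (m : List (List Int))
    (hagree : ∀ x y, 1 ≤ x → 1 ≤ y → pvGetCell m x y = pvGetCell m0 x y) :
    I.foldl (fun m i => J.foldl (fun m j =>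
        if pvGetCell m i j = 1 then pvSetCell (pvSetCell m i 0 1) 0 j 1 else m) m) m =
      pvWriteAll (I.flatMap fun i => J.flatMap fun j =>
        if pvGetCell m0 i j = 1 then [(i, 0), (0, j)] else []) m := by
  induction I generalizing m with
  | nil => rfl
  | cons i I ih =>
    have hi : 1 ≤ i := hI i (List.mem_cons_self ..)
    have hI' : ∀ a ∈ I, 1 ≤ a := fun a ha => hI a (List.mem_cons_of_mem _ ha)
    rw [List.foldl_cons, List.flatMap_cons, mark_inner m0 i J hJ m hagree hi]
    have hchunk : ∀ p ∈ (J.flatMap fun j =>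
        if pvGetCell m0 i j = 1 then [(i, 0), (0, j)] else []), p.1 = 0 ∨ p.2 = 0 := by
      intro p hp
      simp only [List.mem_flatMap, mem_ite_list, List.mem_cons,
        List.not_mem_nil, or_false] at hp
      obtain ⟨j, -, -, hp⟩ := hp
      rcases hp with rfl | rfl
      · right; rfl
      · left; rfl
    have hagree' : ∀ x y, 1 ≤ x → 1 ≤ y →
        pvGetCell (pvWriteAll (J.flatMap fun j =>
          if pvGetCell m0 i j = 1 then [(i, 0), (0, j)] else []) m) x y =
        pvGetCell m0 x y := by
      intro x y hx hy
      rw [interiorPres _ _ hchunk x y hx hy]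
      exact hagree x y hx hy
    rw [ih hI' _ hagree']
    unfold pvWriteAll
    rw [List.foldl_append]

theorem fill_inner (m1 : List (List Int)) (i : Nat) (J : List Nat)
    (hJ : ∀ j ∈ J, 1 ≤ j) (m : List (List Int))
    (hagree : ∀ x y, x = 0 ∨ y = 0 → pvGetCell m x y = pvGetCell m1 x y) (hi : 1 ≤ i) :
    J.foldl (fun m j =>
        if pvGetCell m i 0 = 1 ∨ pvGetCell m 0 j = 1 then pvSetCell m i j 1 else m) m =
      pvWriteAll (J.flatMap fun j =>
        if pvGetCell m1 i 0 = 1 ∨ pvGetCell m1 0 j = 1 then [(i, j)] else []) m := by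
  induction J generalizing m with
  | nil => rfl
  | cons j J ih =>
    have hj : 1 ≤ j := hJ j (List.mem_cons_self ..)
    have hJ' : ∀ j ∈ J, 1 ≤ j := fun a ha => hJ a (List.mem_cons_of_mem _ ha)
    rw [List.foldl_cons, List.flatMap_cons]
    rw [hagree i 0 (Or.inr rfl), hagree 0 j (Or.inl rfl)]
    by_cases hq : pvGetCell m1 i 0 = 1 ∨ pvGetCell m1 0 j = 1
    · rw [if_pos hq, if_pos hq]
      have hagree' : ∀ x y, x = 0 ∨ y = 0 →
          pvGetCell (pvSetCell m i j 1) x y = pvGetCell m1 x y := by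
        intro x y h0
        rw [getCell_pvSetCell, if_neg (by omega)]
        exact hagree x y h0
      rw [ih hJ' _ hagree']
      rfl
    · rw [if_neg hq, if_neg hq, List.nil_append, ih hJ' _ hagree]

theorem fill_outer (m1 : List (List Int)) (I : List Nat) (hI : ∀ i ∈ I, 1 ≤ i)
    (J : List Nat) (hJ : ∀ j ∈ J, 1 ≤ j) (m : List (List Int))
    (hagree : ∀ x y, x = 0 ∨ y = 0 → pvGetCell m x y = pvGetCell m1 x y) :
    I.foldl (fun m i => J.foldl (fun m j =>
        if pvGetCell m i 0 = 1 ∨ pvGetCell m 0 j = 1 then pvSetCell m i j 1 else m) m) m =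
      pvWriteAll (I.flatMap fun i => J.flatMap fun j =>
        if pvGetCell m1 i 0 = 1 ∨ pvGetCell m1 0 j = 1 then [(i, j)] else []) m := by
  induction I generalizing m with
  | nil => rfl
  | cons i I ih =>
    have hi : 1 ≤ i := hI i (List.mem_cons_self ..)
    have hI' : ∀ a ∈ I, 1 ≤ a := fun a ha => hI a (List.mem_cons_of_mem _ ha)
    rw [List.foldl_cons, List.flatMap_cons, fill_inner m1 i J hJ m hagree hi]
    have hchunk : ∀ p ∈ (J.flatMap fun j =>
        if pvGetCell m1 i 0 = 1 ∨ pvGetCell m1 0 j = 1 then [(i, j)] else []),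
        1 ≤ p.1 ∧ 1 ≤ p.2 := by
      intro p hp
      simp only [List.mem_flatMap, mem_ite_list] at hp
      obtain ⟨j, hjJ, -, hp⟩ := hp
      simp at hp
      subst hp
      exact ⟨hi, hJ j hjJ⟩
    have hagree' : ∀ x y, x = 0 ∨ y = 0 →
        pvGetCell (pvWriteAll (J.flatMap fun j =>
          if pvGetCell m1 i 0 = 1 ∨ pvGetCell m1 0 j = 1 then [(i, j)] else []) m) x y =
        pvGetCell m1 x y := by
      intro x y h0
      rw [borderPres _ _ hchunk x y h0]
      exact hagree x y h0
    rw [ih hI' _ hagree']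
    unfold pvWriteAll
    rw [List.foldl_append]

theorem rowFill_eq (c : Nat) (m : List (List Int)) :
    (List.range c).foldl (fun m j => pvSetCell m 0 j 1) m =
      pvWriteAll ((List.range c).map (fun j => ((0 : Nat), j))) m := by
  unfold pvWriteAll
  rw [List.foldl_map]

theorem colFill_eq (r : Nat) (m : List (List Int)) :
    (List.range r).foldl (fun m i => pvSetCell m i 0 1) m =
      pvWriteAll ((List.range r).map (fun i => (i, (0 : Nat)))) m := by
  unfold pvWriteAll
  rw [List.foldl_map]

theorem mem_range'_one {a n x : Nat} : x ∈ List.range' a n ↔ a ≤ x ∧ x < a + n :=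
  List.mem_range'_1

theorem alt_decomp (m : List (List Int)) (hm : m ≠ []) (hc : 1 ≤ (m.headD []).length) :
    booleanMatrix_alt m =
      pvWriteAll (pvL4 m) (pvWriteAll (pvL3 m) (pvWriteAll (pvL2 m) (pvWriteAll (pvL1 m) m))) := by
  have hg : (m.isEmpty || (m.headD []).isEmpty) = false := by
    rcases m with _ | ⟨h, t⟩
    · exact absurd rfl hm
    · rcases h with _ | ⟨a, h⟩
      · simp at hc
      · rfl
  simp only [booleanMatrix_alt, hg, Bool.false_eq_true, if_false]
  have hrange : ∀ n : Nat, ∀ j ∈ List.range' 1 n, 1 ≤ j := by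
    intro n j hj
    exact (mem_range'_one.mp hj).1
  have h1 : (List.range' 1 (m.length - 1)).foldl (fun m1 i =>
      (List.range' 1 ((m.headD []).length - 1)).foldl (fun m2 j =>
        if pvGetCell m2 i j = 1 then pvSetCell (pvSetCell m2 i 0 1) 0 j 1 else m2) m1) m =
      pvWriteAll (pvL1 m) m := by
    rw [mark_outer m _ (hrange _) _ (hrange _) m (fun _ _ _ _ => rfl)]
    rfl
  rw [h1]
  have h2 : (List.range' 1 (m.length - 1)).foldl (fun m1 i =>
      (List.range' 1 ((m.headD []).length - 1)).foldl (fun m2 j =>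
        if pvGetCell m2 i 0 = 1 ∨ pvGetCell m2 0 j = 1 then pvSetCell m2 i j 1 else m2) m1)
      (pvWriteAll (pvL1 m) m) = pvWriteAll (pvL2 m) (pvWriteAll (pvL1 m) m) := by
    rw [fill_outer (pvWriteAll (pvL1 m) m) _ (hrange _) _ (hrange _) _ (fun _ _ _ => rfl)]
    rfl
  rw [h2]
  unfold pvL4 pvL3
  by_cases h3 : (List.range (m.headD []).length).any (fun j => pvGetCell m 0 j == 1)
  all_goals by_cases h4 : (List.range m.length).any (fun i => pvGetCell m i 0 == 1)
  all_goals simp only [h3, h4, if_true, if_false, Bool.false_eq_true]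
  · rw [rowFill_eq, colFill_eq]
  · rw [rowFill_eq]
    rfl
  · rw [colFill_eq]
    rfl
  · rfl

-- membership characterisations of the four write lists
theorem mem_pvL1 (m : List (List Int)) (x y : Nat) :
    (x, y) ∈ pvL1 m ↔
      (y = 0 ∧ 1 ≤ x ∧ x < m.length ∧
        ∃ j, 1 ≤ j ∧ j < (m.headD []).length ∧ pvGetCell m x j = 1) ∨
      (x = 0 ∧ 1 ≤ y ∧ y < (m.headD []).length ∧
        ∃ i, 1 ≤ i ∧ i < m.length ∧ pvGetCell m i y = 1) := by
  unfold pvL1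
  simp only [List.mem_flatMap, mem_ite_list, mem_range'_one, List.mem_cons,
    List.not_mem_nil, or_false, Prod.mk.injEq]
  constructor
  · rintro ⟨i, hi, j, hj, hq, (⟨rfl, rfl⟩ | ⟨rfl, rfl⟩)⟩
    · exact Or.inl ⟨rfl, hi.1, by omega, j, hj.1, by omega, hq⟩
    · exact Or.inr ⟨rfl, hj.1, by omega, i, hi.1, by omega, hq⟩
  · rintro (⟨rfl, hx1, hxr, j, hj1, hjc, hq⟩ | ⟨rfl, hy1, hyc, i, hi1, hir, hq⟩)
    · exact ⟨x, ⟨hx1, by omega⟩, j, ⟨hj1, by omega⟩, hq, Or.inl ⟨rfl, rfl⟩⟩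
    · exact ⟨i, ⟨hi1, by omega⟩, y, ⟨hy1, by omega⟩, hq, Or.inr ⟨rfl, rfl⟩⟩

theorem m1_row_flag (m : List (List Int)) (hrow : ∀ row ∈ m, (m.headD []).length ≤ row.length)
    (i : Nat) (hi1 : 1 ≤ i) (hir : i < m.length) (hc : 1 ≤ (m.headD []).length) :
    pvGetCell (pvWriteAll (pvL1 m) m) i 0 = 1 ↔
      ∃ j, j < (m.headD []).length ∧ pvGetCell m i j = 1 := by
  have hlen : 1 ≤ (m.getD i []).length := by
    refine le_trans hc (hrow _ ?_)
    rw [List.getD_eq_getElem _ _ hir]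
    exact List.getElem_mem hir
  rw [getCell_pvWriteAll]
  by_cases hmem : (i, 0) ∈ pvL1 m
  · rw [if_pos ⟨hmem, hir, by omega⟩]
    rw [mem_pvL1] at hmem
    rcases hmem with ⟨-, -, -, j, -, hjc, hv⟩ | ⟨h0, -⟩
    · exact ⟨fun _ => ⟨j, hjc, hv⟩, fun _ => rfl⟩
    · omega
  · rw [if_neg (fun h => hmem h.1)]
    constructor
    · intro h
      exact ⟨0, hc, h⟩
    · rintro ⟨j, hjc, hv⟩
      rcases Nat.eq_zero_or_pos j with rfl | hj1
      · exact hv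
      · exact absurd ((mem_pvL1 m i 0).mpr
          (Or.inl ⟨rfl, hi1, hir, j, hj1, hjc, hv⟩)) hmem

theorem m1_col_flag (m : List (List Int)) (hm : m ≠ []) (j : Nat) (hj1 : 1 ≤ j)
    (hjc : j < (m.headD []).length) :
    pvGetCell (pvWriteAll (pvL1 m) m) 0 j = 1 ↔
      ∃ i, i < m.length ∧ pvGetCell m i j = 1 := by
  have hr1 : 1 ≤ m.length := by
    cases m with
    | nil => exact absurd rfl hm
    | cons h t => simp
  have hlen : (m.getD 0 []).length = (m.headD []).length := by
    cases m with
    | nil => exact absurd rfl hm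
    | cons h t => rfl
  rw [getCell_pvWriteAll]
  by_cases hmem : (0, j) ∈ pvL1 m
  · rw [if_pos ⟨hmem, by omega, by omega⟩]
    rw [mem_pvL1] at hmem
    rcases hmem with ⟨-, h0, -⟩ | ⟨-, -, -, i, -, hir, hv⟩
    · omega
    · exact ⟨fun _ => ⟨i, hir, hv⟩, fun _ => rfl⟩
  · rw [if_neg (fun h => hmem h.1)]
    constructor
    · intro h
      exact ⟨0, hr1, h⟩
    · rintro ⟨i, hir, hv⟩
      rcases Nat.eq_zero_or_pos i with rfl | hi1
      · exact hv
      · exact absurd ((mem_pvL1 m 0 j).mpr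
          (Or.inr ⟨rfl, hj1, hjc, i, hi1, hir, hv⟩)) hmem

theorem mem_pvL2 (m : List (List Int)) (hm : m ≠ [])
    (hrow : ∀ row ∈ m, (m.headD []).length ≤ row.length)
    (hc : 1 ≤ (m.headD []).length) (x y : Nat) :
    (x, y) ∈ pvL2 m ↔
      1 ≤ x ∧ x < m.length ∧ 1 ≤ y ∧ y < (m.headD []).length ∧
        ((∃ j, j < (m.headD []).length ∧ pvGetCell m x j = 1) ∨
         (∃ i, i < m.length ∧ pvGetCell m i y = 1)) := by
  unfold pvL2
  simp only [List.mem_flatMap, mem_ite_list, mem_range'_one, List.mem_singleton,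
    Prod.mk.injEq]
  constructor
  · rintro ⟨i, hi, j, hj, hq, rfl, rfl⟩
    have hir : x < m.length := by omega
    have hjc : y < (m.headD []).length := by omega
    refine ⟨hi.1, hir, hj.1, hjc, ?_⟩
    rcases hq with hq | hq
    · exact Or.inl ((m1_row_flag m hrow x hi.1 hir hc).mp hq)
    · exact Or.inr ((m1_col_flag m hm y hj.1 hjc).mp hq)
  · rintro ⟨hx1, hxr, hy1, hyc, hq⟩
    refine ⟨x, ⟨hx1, by omega⟩, y, ⟨hy1, by omega⟩, ?_, rfl, rfl⟩
    rcases hq with hq | hq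
    · exact Or.inl ((m1_row_flag m hrow x hx1 hxr hc).mpr hq)
    · exact Or.inr ((m1_col_flag m hm y hy1 hyc).mpr hq)

theorem mem_pvL3 (m : List (List Int)) (x y : Nat) :
    (x, y) ∈ pvL3 m ↔
      (∃ j, j < (m.headD []).length ∧ pvGetCell m 0 j = 1) ∧ x = 0 ∧
        y < (m.headD []).length := by
  unfold pvL3
  rw [mem_ite_list]
  simp only [List.any_eq_true, List.mem_range, beq_iff_eq, List.mem_map, Prod.mk.injEq]
  constructor
  · rintro ⟨⟨j, hj, hv⟩, j', hj', rfl, rfl⟩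
    exact ⟨⟨j, hj, hv⟩, rfl, hj'⟩
  · rintro ⟨⟨j, hj, hv⟩, rfl, hy⟩
    exact ⟨⟨j, hj, hv⟩, y, hy, rfl, rfl⟩

theorem mem_pvL4 (m : List (List Int)) (x y : Nat) :
    (x, y) ∈ pvL4 m ↔
      (∃ i, i < m.length ∧ pvGetCell m i 0 = 1) ∧ y = 0 ∧ x < m.length := by
  unfold pvL4
  rw [mem_ite_list]
  simp only [List.any_eq_true, List.mem_range, beq_iff_eq, List.mem_map, Prod.mk.injEq]
  constructor
  · rintro ⟨⟨i, hi, hv⟩, i', hi', rfl, rfl⟩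
    exact ⟨⟨i, hi, hv⟩, rfl, hi'⟩
  · rintro ⟨⟨i, hi, hv⟩, rfl, hx⟩
    exact ⟨⟨i, hi, hv⟩, x, hx, rfl, rfl⟩

-- B's result, cell by cell
theorem cellB (m : List (List Int)) (hm : m ≠ [])
    (hrow : ∀ row ∈ m, (m.headD []).length ≤ row.length)
    (hc : 1 ≤ (m.headD []).length) (x y : Nat) (hx : x < m.length)
    (hy : y < (m.getD x []).length) :
    pvGetCell (booleanMatrix_alt m) x y =
      if y < (m.headD []).length ∧
          ((∃ j, j < (m.headD []).length ∧ pvGetCell m x j = 1) ∨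
           (∃ i, i < m.length ∧ pvGetCell m i y = 1)) then 1
      else pvGetCell m x y := by
  rw [alt_decomp m hm hc]
  rw [getCell_pvWriteAll, length_pvWriteAll, length_pvWriteAll, length_pvWriteAll,
    rowlen_pvWriteAll, rowlen_pvWriteAll, rowlen_pvWriteAll,
    getCell_pvWriteAll, length_pvWriteAll, length_pvWriteAll,
    rowlen_pvWriteAll, rowlen_pvWriteAll,
    getCell_pvWriteAll, length_pvWriteAll, rowlen_pvWriteAll,
    getCell_pvWriteAll, if_merge4]
  refine if_congr ?_ rfl rfl
  simp only [hx, hy, and_true]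
  rw [mem_pvL4, mem_pvL3, mem_pvL2 m hm hrow hc, mem_pvL1]
  constructor
  · rintro (⟨⟨i, hir, hv⟩, rfl, -⟩ | ⟨⟨j, hjc, hv⟩, rfl, hyc⟩ |
      ⟨-, -, -, hyc, hq⟩ | ⟨rfl, hx1, hxr, j, -, hjc, hv⟩ | ⟨rfl, hy1, hyc, i, -, hir, hv⟩)
    · exact ⟨hc, Or.inr ⟨i, hir, hv⟩⟩
    · exact ⟨hyc, Or.inl ⟨j, hjc, hv⟩⟩
    · exact ⟨hyc, hq⟩
    · exact ⟨hc, Or.inl ⟨j, hjc, hv⟩⟩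
    · exact ⟨hyc, Or.inr ⟨i, hir, hv⟩⟩
  · rintro ⟨hyc, hq⟩
    rcases Nat.eq_zero_or_pos x with rfl | hx1
    · -- first row
      rcases hq with ⟨j, hjc, hv⟩ | ⟨i, hir, hv⟩
      · exact Or.inr (Or.inl ⟨⟨j, hjc, hv⟩, rfl, hyc⟩)
      · rcases Nat.eq_zero_or_pos i with rfl | hi1
        · exact Or.inr (Or.inl ⟨⟨y, hyc, hv⟩, rfl, hyc⟩)
        · rcases Nat.eq_zero_or_pos y with rfl | hy1
          · exact Or.inl ⟨⟨i, hir, hv⟩, rfl, hx⟩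
          · exact Or.inr (Or.inr (Or.inr (Or.inr ⟨rfl, hy1, hyc, i, hi1, hir, hv⟩)))
    · rcases Nat.eq_zero_or_pos y with rfl | hy1
      · -- first column
        rcases hq with ⟨j, hjc, hv⟩ | ⟨i, hir, hv⟩
        · rcases Nat.eq_zero_or_pos j with rfl | hj1
          · exact Or.inl ⟨⟨x, hx, hv⟩, rfl, hx⟩
          · exact Or.inr (Or.inr (Or.inr (Or.inl ⟨rfl, hx1, hx, j, hj1, hjc, hv⟩)))
        · exact Or.inl ⟨⟨i, hir, hv⟩, rfl, hx⟩
      · -- interior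
        exact Or.inr (Or.inr (Or.inl ⟨hx1, hx, hy1, hyc, hq⟩))

-- lengths are preserved by both programs
theorem length_A (m : List (List Int)) : (booleanMatrix m).length = m.length := by
  simp only [booleanMatrix]
  rw [collect_outer (fun i j => pvGetCell m i j = 1), rowLoop_eq_writeAll,
    colLoop_eq_writeAll, length_pvWriteAll, length_pvWriteAll]

theorem rowlen_A (m : List (List Int)) (x : Nat) :
    ((booleanMatrix m).getD x []).length = (m.getD x []).length := by
  simp only [booleanMatrix]
  rw [collect_outer (fun i j => pvGetCell m i j = 1), rowLoop_eq_writeAll,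
    colLoop_eq_writeAll, rowlen_pvWriteAll, rowlen_pvWriteAll]

theorem length_B (m : List (List Int)) (hm : m ≠ []) (hc : 1 ≤ (m.headD []).length) :
    (booleanMatrix_alt m).length = m.length := by
  rw [alt_decomp m hm hc, length_pvWriteAll, length_pvWriteAll, length_pvWriteAll,
    length_pvWriteAll]

theorem rowlen_B (m : List (List Int)) (hm : m ≠ []) (hc : 1 ≤ (m.headD []).length)
    (x : Nat) : ((booleanMatrix_alt m).getD x []).length = (m.getD x []).length := by
  rw [alt_decomp m hm hc, rowlen_pvWriteAll, rowlen_pvWriteAll, rowlen_pvWriteAll,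
    rowlen_pvWriteAll]

theorem A_id_of_c0 (m : List (List Int)) (hc : (m.headD []).length = 0) :
    booleanMatrix m = m := by
  simp only [booleanMatrix, hc, List.range_zero, List.foldl_nil, foldl_id]
  rfl

theorem pv_main (m : List (List Int)) (hm : m ≠ [])
    (hrow : ∀ row ∈ m, (m.headD []).length ≤ row.length) :
    booleanMatrix m = booleanMatrix_alt m := by
  by_cases hc0 : (m.headD []).length = 0
  · rw [A_id_of_c0 m hc0]
    have hg : (m.isEmpty || (m.headD []).isEmpty) = true := by
      rw [List.isEmpty_iff.mpr (List.length_eq_zero_iff.mp hc0), Bool.or_true]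
    simp only [booleanMatrix_alt, hg, if_true]
  · have hc : 1 ≤ (m.headD []).length := by omega
    refine eq_of_cells _ _ ?_ ?_ ?_
    · rw [length_A, length_B m hm hc]
    · intro x
      rw [rowlen_A, rowlen_B m hm hc]
    · intro x y hx hy
      rw [length_A] at hx
      rw [rowlen_A] at hy
      rw [cellA m x y hx hy, cellB m hm hrow hc x y hx hy]

-- ===== VERDICT (by name: the statement is the Claim_ definition above) =====
theorem booleanMatrix_spec : Claim_equal_booleanMatrix := by
  intro matrix _ hpre
  unfold Spec_booleanMatrix
  exact pv_main matrix hpre.1 hpre.2
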